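-- pv_equiv track=rewrite | github.com/MaikRe/TilingSolver | solver.py | construct_squares_list
-- ===== SOURCE A (Python) =====
-- def construct_squares_list(mandatory_squares, optional_squares):
--     # Calculate num_mandatory as the sum of the second numbers in the mandatory_squares list
--     num_mandatory = sum(count for _, count in mandatory_squares)
--     index = 1
--     # Build the mandatory squares list
--     squares = []
--     for size, count in mandatory_squares:
--         if count > 0:
--             for i in range(1, count + 1):
--                 squares.extend([(size, index)])
--                 index += 1
--
--     # Append the optional squares list
--     for size, count in optional_squares:
--         if count > 0:
--             for i in range(1 + num_mandatory, count + 1 + num_mandatory):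
--                 squares.extend([(size, index)])
--                 index += 1
--
--     return squares, num_mandatory
-- ===== SOURCE B (Python) =====
-- def construct_squares_list(mandatory_squares, optional_squares):
--     num_mandatory = sum(count for _, count in mandatory_squares)
--     # Flatten: one entry of `size` per unit of its (positive) count, mandatory first.
--     flattened = []
--     for size, count in mandatory_squares:
--         if count > 0:
--             flattened += [size] * count
--     for size, count in optional_squares:
--         if count > 0:
--             flattened += [size] * count
--     # Number the repetitions positionally instead of threading an index counter.
--     squares = [(size, i) for i, size in enumerate(flattened, start=1)]
--     return squares, num_mandatory
-- ===== Notes on version B (the rewrite author's own statement) =====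
-- stated objective: simpler
-- what changed: Replaces A's hand-threaded index counter and per-pair range loops by flattening sizes with list multiplication and numbering them with a single enumerate.
import Mathlib
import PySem

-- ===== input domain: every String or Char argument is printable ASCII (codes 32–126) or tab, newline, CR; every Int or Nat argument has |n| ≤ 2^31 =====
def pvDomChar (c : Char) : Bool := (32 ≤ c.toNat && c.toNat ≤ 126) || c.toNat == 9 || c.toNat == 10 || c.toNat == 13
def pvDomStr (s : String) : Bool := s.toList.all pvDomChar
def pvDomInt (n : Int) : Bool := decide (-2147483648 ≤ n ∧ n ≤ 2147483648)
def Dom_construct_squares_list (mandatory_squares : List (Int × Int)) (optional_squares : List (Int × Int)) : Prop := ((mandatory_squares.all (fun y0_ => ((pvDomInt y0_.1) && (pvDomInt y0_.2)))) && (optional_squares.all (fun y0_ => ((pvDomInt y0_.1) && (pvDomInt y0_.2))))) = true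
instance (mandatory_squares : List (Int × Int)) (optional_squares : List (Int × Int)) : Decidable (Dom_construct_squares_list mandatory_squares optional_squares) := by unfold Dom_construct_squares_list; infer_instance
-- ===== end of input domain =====

-- B replaces A's hand-threaded index counter and per-pair range loops by flattening the
-- repeated sizes and numbering them positionally with enumerate (objective: simpler).

-- ===== PORT A =====
-- transliteration of A: nested loops pushing (size, index) with a threaded index counter
def construct_squares_list (mandatory_squares : List (Int × Int)) (optional_squares : List (Int × Int)) : (List (Int × Int)) × Int :=
  let num_mandatory : Int := mandatory_squares.foldl (fun s p => s + p.2) 0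
  let st1 : List (Int × Int) × Int :=
    mandatory_squares.foldl (fun st p =>
      if p.2 > 0 then
        (PySem.List.pyRange 1 (p.2 + 1) 1).foldl
          (fun st _i => (st.1 ++ [(p.1, st.2)], st.2 + 1)) st
      else st) ([], 1)
  let st2 : List (Int × Int) × Int :=
    optional_squares.foldl (fun st p =>
      if p.2 > 0 then
        (PySem.List.pyRange (1 + num_mandatory) (p.2 + 1 + num_mandatory) 1).foldl
          (fun st _i => (st.1 ++ [(p.1, st.2)], st.2 + 1)) st
      else st) st1
  (st2.1, num_mandatory)

-- ===== PORT B =====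
-- B: flatten sizes by replication (mandatory then optional), then number them with enumerate(start=1)
def construct_squares_list_alt (mandatory_squares : List (Int × Int)) (optional_squares : List (Int × Int)) : (List (Int × Int)) × Int :=
  let num_mandatory : Int := mandatory_squares.foldl (fun s p => s + p.2) 0
  let fl1 : List Int :=
    mandatory_squares.foldl (fun acc p => if p.2 > 0 then acc ++ List.replicate p.2.toNat p.1 else acc) []
  let flattened : List Int :=
    optional_squares.foldl (fun acc p => if p.2 > 0 then acc ++ List.replicate p.2.toNat p.1 else acc) fl1
  let squares : List (Int × Int) := (PySem.List.enumerate flattened 1).map (fun q => (q.2, q.1))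
  (squares, num_mandatory)

-- ===== PRECONDITION & SPEC =====
def Spec_construct_squares_list (mandatory_squares : List (Int × Int)) (optional_squares : List (Int × Int)) (out : (List (Int × Int)) × Int) : Prop := out = construct_squares_list_alt mandatory_squares optional_squares
instance (mandatory_squares : List (Int × Int)) (optional_squares : List (Int × Int)) (out : (List (Int × Int)) × Int) : Decidable (Spec_construct_squares_list mandatory_squares optional_squares out) := by unfold Spec_construct_squares_list; infer_instance

-- ===== CLAIM (what is proved, stated in full; the proofs are below) =====
def Claim_equal_construct_squares_list : Prop := ∀ (mandatory_squares : List (Int × Int)) (optional_squares : List (Int × Int)), Dom_construct_squares_list mandatory_squares optional_squares → Spec_construct_squares_list mandatory_squares optional_squares (construct_squares_list mandatory_squares optional_squares)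

-- ===== LEMMAS AND PROOFS =====


-- enumMap fl s = the (size, index) pairs B builds from flattened sizes fl starting at index s
def pvEnumMap (fl : List Int) (s : Int) : List (Int × Int) :=
  (PySem.List.enumerate fl s).map (fun q => (q.2, q.1))

lemma pvEnumMap_nil (s : Int) : pvEnumMap [] s = [] := rfl

lemma pvEnumMap_append (fl gl : List Int) (s : Int) :
    pvEnumMap (fl ++ gl) s = pvEnumMap fl s ++ pvEnumMap gl (s + fl.length) := by
  simp [pvEnumMap, PySem.List.enumerate_append]

-- the inner push loop ignores the range elements: only the length matters
lemma pvInner (size : Int) : ∀ (r : List Int) (sq : List (Int × Int)) (idx : Int),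
    r.foldl (fun (st : List (Int × Int) × Int) _i => (st.1 ++ [(size, st.2)], st.2 + 1)) (sq, idx)
      = (sq ++ pvEnumMap (List.replicate r.length size) idx, idx + r.length) := by
  intro r
  induction r with
  | nil => intro sq idx; simp [pvEnumMap]
  | cons a r ih =>
    intro sq idx
    simp only [List.foldl_cons, List.length_cons, List.replicate_succ]
    rw [ih]
    refine Prod.ext ?_ (by push_cast; ring)
    simp [pvEnumMap, PySem.List.enumerate_cons]

-- one outer step preserves the "state = (pvEnumMap fl 1, fl.length + 1)" invariant,
-- for any range generator g whose length is the (positive) count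
lemma pvOuter (g : Int → List Int) (hg : ∀ c : Int, 0 < c → (g c).length = c.toNat) :
    ∀ (l : List (Int × Int)) (fl : List Int),
    l.foldl (fun (st : List (Int × Int) × Int) p =>
        if p.2 > 0 then
          (g p.2).foldl (fun st _i => (st.1 ++ [(p.1, st.2)], st.2 + 1)) st
        else st) (pvEnumMap fl 1, (fl.length : Int) + 1)
      = (pvEnumMap (l.foldl (fun acc p => if p.2 > 0 then acc ++ List.replicate p.2.toNat p.1 else acc) fl) 1,
         ((l.foldl (fun acc p => if p.2 > 0 then acc ++ List.replicate p.2.toNat p.1 else acc) fl).length : Int) + 1) := by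
  intro l
  induction l with
  | nil => intro fl; rfl
  | cons p l ih =>
    intro fl
    simp only [List.foldl_cons]
    by_cases hp : p.2 > 0
    · simp only [hp, if_pos]
      rw [pvInner, hg p.2 hp]
      have h1 : pvEnumMap fl 1 ++ pvEnumMap (List.replicate p.2.toNat p.1) ((fl.length : Int) + 1)
          = pvEnumMap (fl ++ List.replicate p.2.toNat p.1) 1 := by
        rw [pvEnumMap_append]; ring_nf
      have h2 : (fl.length : Int) + 1 + (p.2.toNat : Int)
          = ((fl ++ List.replicate p.2.toNat p.1).length : Int) + 1 := by
        simp; ring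
      rw [h1, h2, ih]
    · rw [if_neg hp, if_neg hp]
      exact ih fl

-- ===== VERDICT (by name: the statement is the Claim_ definition above) =====
theorem construct_squares_list_spec : Claim_equal_construct_squares_list := by
  intro m o _hD
  unfold Spec_construct_squares_list construct_squares_list construct_squares_list_alt
  have hm := pvOuter (fun c => PySem.List.pyRange 1 (c + 1) 1)
    (fun c hc => by rw [PySem.List.length_pyRange_one]; congr 1; omega) m []
  simp only [pvEnumMap_nil, List.length_nil, Nat.cast_zero, zero_add] at hm
  set nm : Int := m.foldl (fun s p => s + p.2) 0 with hnm
  have ho := pvOuter (fun c => PySem.List.pyRange (1 + nm) (c + 1 + nm) 1)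
    (fun c hc => by rw [PySem.List.length_pyRange_one]; congr 1; omega) o
    (m.foldl (fun acc p => if p.2 > 0 then acc ++ List.replicate p.2.toNat p.1 else acc) [])
  dsimp only
  rw [hm, ho]
  simp [pvEnumMap]
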